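-- pv_equiv track=rewrite | github.com/thomation/GAMES-105 | lab1/Lab1_FK_answers.py | compute_motion_data_index
-- ===== SOURCE A (Python) =====
-- def compute_motion_data_index(joint_names, joint_name):
--     index = 3
--     for i in range(len(joint_names)):
--         if joint_names[i] == joint_name:
--             return index
--         elif(not joint_names[i].endswith("_end")):
--             index += 3
--     # raise exception
--     raise ValueError(f"Joint name {joint_name} not found in joint names list")
-- ===== SOURCE B (Python) =====
-- def compute_motion_data_index(joint_names, joint_name):
--     if joint_name not in joint_names:
--         raise ValueError(f"Joint name {joint_name} not found in joint names list")
--     p = joint_names.index(joint_name)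
--     count = sum(1 for n in joint_names[:p] if not n.endswith("_end"))
--     return 3 + 3 * count
-- ===== Notes on version B (the rewrite author's own statement) =====
-- stated objective: simpler
-- what changed: Replaces A's fused scan-and-accumulate loop by a locate step (list.index) followed by a separate prefix count of non-'_end' names, returning 3 + 3*count.
import Mathlib
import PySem

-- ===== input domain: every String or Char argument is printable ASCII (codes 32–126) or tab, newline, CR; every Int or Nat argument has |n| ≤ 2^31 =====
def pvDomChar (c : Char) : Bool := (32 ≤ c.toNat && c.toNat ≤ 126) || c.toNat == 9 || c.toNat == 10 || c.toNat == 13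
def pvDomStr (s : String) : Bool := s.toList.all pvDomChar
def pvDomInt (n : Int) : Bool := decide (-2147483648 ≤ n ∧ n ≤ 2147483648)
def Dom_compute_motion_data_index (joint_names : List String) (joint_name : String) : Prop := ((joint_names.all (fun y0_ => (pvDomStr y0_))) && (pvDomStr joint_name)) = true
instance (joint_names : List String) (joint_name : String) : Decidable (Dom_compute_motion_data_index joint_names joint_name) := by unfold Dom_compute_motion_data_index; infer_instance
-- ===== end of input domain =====

-- B replaces A's fused scan-and-accumulate loop by a locate step followed by a
-- separate prefix count of non-'_end' names (objective: simpler decomposition).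
-- ===== PORT A =====
def pvLoopA (joint_name : String) : List String → Int → Int
  | [], _ => 0   -- Python raises ValueError here; excluded by Pre_
  | x :: xs, index =>
      if x = joint_name then index
      else if ¬ (PySem.Str.endswith x "_end") = true then pvLoopA joint_name xs (index + 3)
      else pvLoopA joint_name xs index

def compute_motion_data_index (joint_names : List String) (joint_name : String) : Int :=
  pvLoopA joint_name joint_names 3

-- ===== PORT B =====
def compute_motion_data_index_alt (joint_names : List String) (joint_name : String) : Int :=
  match PySem.List.index? joint_names joint_name with
  | none => 0   -- Python raises ValueError here; excluded by Pre_
  | some p =>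
      3 + 3 * (((joint_names.take p).countP (fun n => !(PySem.Str.endswith n "_end")) : Nat) : Int)

-- ===== PRECONDITION & SPEC =====
-- Pre_ excludes exactly the inputs where the Python A raises ValueError (name absent).
def Pre_compute_motion_data_index (joint_names : List String) (joint_name : String) : Prop :=
  joint_name ∈ joint_names
instance (joint_names : List String) (joint_name : String) : Decidable (Pre_compute_motion_data_index joint_names joint_name) := by unfold Pre_compute_motion_data_index; infer_instance
def pvWitness_compute_motion_data_index : List String × String := (["root", "hip_end", "knee"], "knee")

def Spec_compute_motion_data_index (joint_names : List String) (joint_name : String) (out : Int) : Prop := out = compute_motion_data_index_alt joint_names joint_name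
instance (joint_names : List String) (joint_name : String) (out : Int) : Decidable (Spec_compute_motion_data_index joint_names joint_name out) := by unfold Spec_compute_motion_data_index; infer_instance

-- ===== CLAIM (what is proved, stated in full; the proofs are below) =====
def Claim_equal_compute_motion_data_index : Prop := ∀ (joint_names : List String) (joint_name : String), Dom_compute_motion_data_index joint_names joint_name → Pre_compute_motion_data_index joint_names joint_name → Spec_compute_motion_data_index joint_names joint_name (compute_motion_data_index joint_names joint_name)

-- ===== LEMMAS AND PROOFS =====
theorem pvLoopA_eq (jn : String) (l : List String) (p : Nat)
    (hp : PySem.List.index? l jn = some p) :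
    ∀ idx : Int, pvLoopA jn l idx =
      idx + 3 * (((l.take p).countP (fun n => !(PySem.Str.endswith n "_end")) : Nat) : Int) := by
  induction l generalizing p with
  | nil => simp [PySem.List.index?] at hp
  | cons x xs ih =>
    intro idx
    by_cases hx : x = jn
    · subst hx
      rw [PySem.List.index?_cons_self] at hp
      cases hp
      simp [pvLoopA]
    · rw [PySem.List.index?_cons_of_ne xs hx] at hp
      cases hq : PySem.List.index? xs jn with
      | none => rw [hq] at hp; simp at hp
      | some q =>
        rw [hq] at hp
        simp at hp
        subst hp
        simp [pvLoopA, hx, List.countP_cons, ih q hq]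
        split_ifs <;> ring

-- ===== VERDICT (by name: the statement is the Claim_ definition above) =====
theorem compute_motion_data_index_spec : Claim_equal_compute_motion_data_index := by
  intro l jn _ hpre
  unfold Spec_compute_motion_data_index compute_motion_data_index compute_motion_data_index_alt
  have hmem : jn ∈ l := hpre
  rw [← PySem.List.index?_isSome_iff] at hmem
  cases hp : PySem.List.index? l jn with
  | none => rw [hp] at hmem; simp at hmem
  | some p => rw [pvLoopA_eq jn l p hp 3]
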